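-- pv_equiv track=rewrite | github.com/interstellarEMwave/hanoi_dudeney | dudeney.py | stepsNeeded
-- ===== SOURCE A (Python) =====
-- def stepsNeeded(r, n):
--     if n == 0:
--         return 0, [0]*(r-1)
--
--     increment = 1
--     pegs = [0]*(r)
--     left = [1]*(r-1)
--     pegs[1] = 1
--     n -= 1
--
--     if(n == 0):
--         return 1, pegs
--
--     total = 0
--
--
--     while n > 0:
--         for i in range(1, r-1):
--             pegs[i+1] += min(n, left[i])
--             total += increment*min(n, left[i])
--             n -= min(n, left[i])
--             left[i] = 1
--             for j in range(1, i):
--                 left[i] += pegs[j+1]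
--
--
--         increment *= 2
--
--     return 2*total+1, pegs
-- ===== SOURCE B (Python) =====
-- def stepsNeeded(r, n):
--     # Index-free reformulation: pegs[2:] and the per-round capacities are kept as two
--     # parallel lists, rebuilt each round by a single traversal over zip(left, tail);
--     # the running value s replaces A's O(i) recomputation of left[i].
--     if n == 0:
--         return 0, [0] * (r - 1)
--     if n == 1:
--         return 1, [0, 1] + [0] * (r - 2)
--     n -= 1
--     total = 0
--     inc = 1
--     tail = [0] * (r - 2)   # pegs[2:]
--     left = [1] * (r - 2)   # capacities for this round
--     while n > 0:
--         new_tail = []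
--         new_left = []
--         s = 1
--         for cap, p in zip(left, tail):
--             take = min(n, cap)
--             n -= take
--             total += inc * take
--             q = p + take
--             new_tail.append(q)
--             new_left.append(s)
--             s += q
--         tail, left = new_tail, new_left
--         inc *= 2
--     return 2 * total + 1, [0, 1] + tail
-- ===== Notes on version B (the rewrite author's own statement) =====
-- stated objective: faster
-- what changed: B drops A's indexed arrays entirely: pegs[2:] and the round capacities are two parallel lists traversed once per round via zip and rebuilt, with a running sum s replacing A's O(i) inner loop that recomputes left[i] from scratch.
import Mathlib
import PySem

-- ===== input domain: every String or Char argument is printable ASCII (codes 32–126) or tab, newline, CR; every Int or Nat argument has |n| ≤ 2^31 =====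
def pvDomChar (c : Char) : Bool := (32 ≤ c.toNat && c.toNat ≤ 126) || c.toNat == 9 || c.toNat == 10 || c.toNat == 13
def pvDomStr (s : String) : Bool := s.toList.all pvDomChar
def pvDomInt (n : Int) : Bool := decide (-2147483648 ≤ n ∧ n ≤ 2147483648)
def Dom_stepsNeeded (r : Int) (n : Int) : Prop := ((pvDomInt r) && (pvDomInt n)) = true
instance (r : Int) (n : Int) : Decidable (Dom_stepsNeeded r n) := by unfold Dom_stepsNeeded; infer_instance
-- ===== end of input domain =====

-- B computes the same step count and peg distribution without indexed arrays: pegs[2:] and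
-- the round capacities are parallel lists rebuilt by one zip traversal per round, a running
-- sum replacing A's per-index recomputation of left[i] (objective: faster).

-- ===== PORT A =====
-- left[i] = 1; for j in range(1, i): left[i] += pegs[j+1]
def leftValA (pegs : List Int) (i : Int) : Int :=
  (PySem.List.pyRange 1 i 1).foldl (fun acc j => acc + PySem.List.pyGetD pegs (j + 1) 0) 1

-- one iteration of A's 'for i in range(1, r-1)' over state (pegs, left, n, total)
def bodyA (inc : Int) (st : List Int × List Int × Int × Int) (i : Int) :
    List Int × List Int × Int × Int :=
  let m := min st.2.2.1 (PySem.List.pyGetD st.2.1 i 0)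
  let pegs := PySem.List.pySetD st.1 (i + 1) (PySem.List.pyGetD st.1 (i + 1) 0 + m)
  let total := st.2.2.2 + inc * m
  let n := st.2.2.1 - m
  let left := PySem.List.pySetD st.2.1 i (leftValA pegs i)
  (pegs, left, n, total)

-- A's 'while n > 0' loop; the fuel only makes it total (inside Pre_ each round lowers n by
-- at least 1, so fuel n.toNat+1 is never exhausted before n ≤ 0)
def loopA : Nat → Int → Int → List Int → List Int → Int → Int → Int × List Int
  | 0, _, _, pegs, _, _, total => (2 * total + 1, pegs)
  | Nat.succ f, r, inc, pegs, left, n, total =>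
    if n > 0 then
      let st := (PySem.List.pyRange 1 (r - 1) 1).foldl (bodyA inc) (pegs, left, n, total)
      loopA f r (inc * 2) st.1 st.2.1 st.2.2.1 st.2.2.2
    else (2 * total + 1, pegs)

def stepsNeeded (r : Int) (n : Int) : Int × List Int :=
  if n = 0 then (0, List.replicate (r - 1).toNat 0)
  else
    let pegs := PySem.List.pySetD (List.replicate r.toNat 0) 1 1
    let left := List.replicate (r - 1).toNat 1
    let n1 := n - 1
    if n1 = 0 then (1, pegs)
    else loopA (n1.toNat + 1) r 1 pegs left n1 0

-- ===== PORT B =====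
-- B's 'for cap, p in zip(left, tail)': the obvious structural recursion over the zipped
-- list, returning (new_tail, new_left, n, total); s is the running sum
def roundB (inc : Int) : List (Int × Int) → Int → Int → Int → List Int × List Int × Int × Int
  | [], n, tot, _ => ([], [], n, tot)
  | (cap, p) :: rest, n, tot, s =>
    let take := min n cap
    let q := p + take
    let res := roundB inc rest (n - take) (tot + inc * take) (s + q)
    (q :: res.1, s :: res.2.1, res.2.2.1, res.2.2.2)

-- B's 'while n > 0' loop, same fuel device as loopA
def loopB : Nat → Int → Int → List Int → List Int → Int → Int → Int × List Int
  | 0, _, _, tail, _, _, total => (2 * total + 1, 0 :: 1 :: tail)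
  | Nat.succ f, r, inc, tail, left, n, total =>
    if n > 0 then
      let res := roundB inc (left.zip tail) n total 1
      loopB f r (inc * 2) res.1 res.2.1 res.2.2.1 res.2.2.2
    else (2 * total + 1, 0 :: 1 :: tail)

def stepsNeeded_alt (r : Int) (n : Int) : Int × List Int :=
  if n = 0 then (0, List.replicate (r - 1).toNat 0)
  else if n = 1 then (1, 0 :: 1 :: List.replicate (r - 2).toNat 0)
  else loopB ((n - 1).toNat + 1) r 1 (List.replicate (r - 2).toNat 0)
         (List.replicate (r - 2).toNat 1) (n - 1) 0

-- ===== PRECONDITION & SPEC =====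
-- Pre_ excludes only inputs where A does not return: r ≤ 1 with n ≠ 0 raises IndexError
-- (pegs[1] on a list shorter than 2), and r = 2 with n ≥ 2 loops forever (the inner for
-- loop body is empty, so n never decreases).
def Pre_stepsNeeded (r : Int) (n : Int) : Prop := n = 0 ∨ 3 ≤ r ∨ (r = 2 ∧ n ≤ 1)
instance (r : Int) (n : Int) : Decidable (Pre_stepsNeeded r n) := by
  unfold Pre_stepsNeeded; infer_instance
def pvWitness_stepsNeeded : Int × Int := (4, 10)

def Spec_stepsNeeded (r : Int) (n : Int) (out : Int × List Int) : Prop := out = stepsNeeded_alt r n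
instance (r : Int) (n : Int) (out : Int × List Int) : Decidable (Spec_stepsNeeded r n out) := by
  unfold Spec_stepsNeeded; infer_instance

-- ===== CLAIM (what is proved, stated in full; the proofs are below) =====
def Claim_equal_stepsNeeded : Prop :=
  ∀ (r : Int) (n : Int), Dom_stepsNeeded r n → Pre_stepsNeeded r n →
    Spec_stepsNeeded r n (stepsNeeded r n)

-- ===== LEMMAS AND PROOFS =====

-- Σ_{k=1}^{m} p[k] (getD-with-0 indexing): the quantity A's left[i] recomputation yields
def sum1 (p : List Int) : Nat → Int
  | 0 => 0
  | Nat.succ m => sum1 p m + p.getD (m + 1) 0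

lemma pyGetD_nn (xs : List Int) (i d : Int) (h : 0 ≤ i) :
    PySem.List.pyGetD xs i d = xs.getD i.toNat d := by
  conv_lhs => rw [← Int.toNat_of_nonneg h]
  rw [PySem.List.pyGetD_natCast]

lemma pySetD_nn (xs : List Int) (i v : Int) (h : 0 ≤ i) :
    PySem.List.pySetD xs i v = xs.set i.toNat v := by
  conv_lhs => rw [← Int.toNat_of_nonneg h]
  rw [PySem.List.pySetD_natCast]

lemma set_cons_succ' (x w : Int) (xs : List Int) (i : Nat) :
    (x :: xs).set (i + 1) w = x :: xs.set i w := rfl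

lemma getD_append_at : ∀ (acc rest : List Int) (i : Nat) (d : Int), i = acc.length →
    (acc ++ rest).getD i d = rest.getD 0 d := by
  intro acc
  induction acc with
  | nil => intro rest i d h; subst h; rfl
  | cons x t ih =>
    intro rest i d h; subst h
    simp only [List.cons_append, List.length_cons, List.getD_cons_succ]
    exact ih rest t.length d rfl

lemma set_append_at : ∀ (acc : List Int) (x w : Int) (rest : List Int) (i : Nat),
    i = acc.length → (acc ++ x :: rest).set i w = acc ++ w :: rest := by
  intro acc
  induction acc with
  | nil => intro x w rest i h; subst h; rfl
  | cons y t ih =>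
    intro x w rest i h; subst h
    simp only [List.cons_append, List.length_cons, set_cons_succ']
    rw [ih x w rest t.length rfl]

lemma sum1_one (p : List Int) : sum1 p 1 = p.getD 1 0 := by
  have h1 : sum1 p 1 = sum1 p 0 + p.getD 1 0 := rfl
  have h0 : sum1 p 0 = 0 := rfl
  rw [h1, h0, zero_add]

lemma leftValA_eq : ∀ (m : Nat) (p : List Int), p.getD 1 0 = 1 →
    leftValA p ((m : Int) + 1) = sum1 p (m + 1) := by
  intro m
  induction m with
  | zero =>
    intro p hp
    unfold leftValA
    rw [show ((0 : Nat) : Int) + 1 = 1 by norm_num]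
    rw [PySem.List.pyRange_one_eq_nil (by norm_num)]
    simp only [List.foldl_nil, sum1]
    rw [show (0 : Nat) + 1 = 1 from rfl, hp]
    norm_num
  | succ m ih =>
    intro p hp
    unfold leftValA at ih ⊢
    rw [show ((m + 1 : Nat) : Int) + 1 = ((m : Int) + 1) + 1 by push_cast; ring]
    rw [PySem.List.pyRange_one_succ_right (by omega)]
    rw [List.foldl_append]
    simp only [List.foldl_cons, List.foldl_nil]
    rw [ih p hp]
    rw [show (m : Int) + 1 + 1 = ((m + 2 : Nat) : Int) by push_cast; ring]
    rw [PySem.List.pyGetD_natCast]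
    show sum1 p (m + 1) + p.getD (m + 2) 0 = sum1 p (m + 1 + 1)
    simp [sum1]

-- the value A recomputes for left[i] is 1 + (sum of the pegs strictly between 1 and i+1)
lemma sum1_shape : ∀ (dt rest : List Int),
    sum1 (0 :: 1 :: (dt ++ rest)) (dt.length + 1) = 1 + dt.sum := by
  intro dt
  induction dt using List.reverseRecOn with
  | nil =>
    intro rest
    simp only [List.length_nil, List.nil_append, List.sum_nil, Nat.zero_add, add_zero]
    rw [sum1_one]
    simp
  | append_singleton dt x ih =>
    intro rest
    have hlen : (dt ++ [x]).length = dt.length + 1 := by simp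
    rw [hlen]
    show sum1 (0 :: 1 :: (dt ++ [x] ++ rest)) (dt.length + 1)
        + (0 :: 1 :: (dt ++ [x] ++ rest)).getD (dt.length + 1 + 1) 0 = _
    rw [List.append_assoc]
    rw [ih ([x] ++ rest)]
    have hg : (0 :: 1 :: (dt ++ ([x] ++ rest))).getD (dt.length + 1 + 1) 0 = x := by
      simp only [List.getD_cons_succ]
      rw [getD_append_at dt ([x] ++ rest) dt.length 0 rfl]
      rfl
    rw [hg]
    simp [List.sum_append]
    ring

lemma roundB_len (inc : Int) : ∀ (prs : List (Int × Int)) (n tot s : Int),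
    (roundB inc prs n tot s).1.length = prs.length ∧
    (roundB inc prs n tot s).2.1.length = prs.length := by
  intro prs
  induction prs with
  | nil => intro n tot s; exact ⟨rfl, rfl⟩
  | cons hd rest ih =>
    intro n tot s
    obtain ⟨cap, p⟩ := hd
    simp only [roundB, List.length_cons]
    obtain ⟨h1, h2⟩ := ih (n - min n cap) (tot + inc * min n cap) (s + (p + min n cap))
    exact ⟨by rw [h1], by rw [h2]⟩

-- one round: A's indexed fold over range(1, r-1) equals B's zip traversal
lemma roundEq (r inc : Int) : ∀ (m : Nat) (a : Int), 1 ≤ a → (r - 1 - a).toNat = m →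
    ∀ (dt dl rt rl : List Int) (n tot : Int),
    dt.length = (a - 1).toNat → dl.length = (a - 1).toNat →
    rt.length = m → rl.length = m →
    (PySem.List.pyRange a (r - 1) 1).foldl (bodyA inc)
        (0 :: 1 :: (dt ++ rt), 1 :: (dl ++ rl), n, tot)
      = (0 :: 1 :: (dt ++ (roundB inc (rl.zip rt) n tot (1 + dt.sum)).1),
         1 :: (dl ++ (roundB inc (rl.zip rt) n tot (1 + dt.sum)).2.1),
         (roundB inc (rl.zip rt) n tot (1 + dt.sum)).2.2.1,
         (roundB inc (rl.zip rt) n tot (1 + dt.sum)).2.2.2) := by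
  intro m
  induction m with
  | zero =>
    intro a ha hm dt dl rt rl n tot hdt hdl hrt hrl
    have hrt0 : rt = [] := List.eq_nil_of_length_eq_zero hrt
    have hrl0 : rl = [] := List.eq_nil_of_length_eq_zero hrl
    subst hrt0; subst hrl0
    rw [PySem.List.pyRange_one_eq_nil (show r - 1 ≤ a by omega)]
    simp [roundB]
  | succ m ih =>
    intro a ha hm dt dl rt rl n tot hdt hdl hrt hrl
    obtain ⟨p0, rt', rfl⟩ : ∃ x xs, rt = x :: xs := by
      cases rt with
      | nil => simp at hrt
      | cons x xs => exact ⟨x, xs, rfl⟩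
    obtain ⟨cap, rl', rfl⟩ : ∃ x xs, rl = x :: xs := by
      cases rl with
      | nil => simp at hrl
      | cons x xs => exact ⟨x, xs, rfl⟩
    have hka : a.toNat = (a - 1).toNat + 1 := by omega
    have hk1 : (a + 1).toNat = (a - 1).toNat + 2 := by omega
    -- the values A's step reads
    have gL : PySem.List.pyGetD (1 :: (dl ++ cap :: rl')) a 0 = cap := by
      rw [pyGetD_nn _ _ _ (by omega), hka, List.getD_cons_succ,
          getD_append_at dl (cap :: rl') (a - 1).toNat 0 hdl.symm, List.getD_cons_zero]
    have gP : PySem.List.pyGetD (0 :: 1 :: (dt ++ p0 :: rt')) (a + 1) 0 = p0 := by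
      rw [pyGetD_nn _ _ _ (by omega), hk1]
      simp only [List.getD_cons_succ]
      rw [getD_append_at dt (p0 :: rt') (a - 1).toNat 0 hdt.symm, List.getD_cons_zero]
    set take := min n cap with htake
    set q := p0 + take with hq
    -- A's step, component by component
    have hPegs : PySem.List.pySetD (0 :: 1 :: (dt ++ p0 :: rt')) (a + 1) (p0 + take)
        = 0 :: 1 :: (dt ++ q :: rt') := by
      rw [pySetD_nn _ _ _ (by omega), hk1]
      simp only [set_cons_succ']
      rw [set_append_at dt p0 q rt' (a - 1).toNat hdt.symm]
    have hSval : leftValA (0 :: 1 :: (dt ++ q :: rt')) a = 1 + dt.sum := by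
      have haa : a = ((dt.length : Nat) : Int) + 1 := by omega
      rw [haa, leftValA_eq dt.length _ (by simp)]
      exact sum1_shape dt (q :: rt')
    have hLeft : PySem.List.pySetD (1 :: (dl ++ cap :: rl')) a (1 + dt.sum)
        = 1 :: (dl ++ (1 + dt.sum) :: rl') := by
      rw [pySetD_nn _ _ _ (by omega), hka]
      simp only [set_cons_succ']
      rw [set_append_at dl cap (1 + dt.sum) rl' (a - 1).toNat hdl.symm]
    have hA : bodyA inc (0 :: 1 :: (dt ++ p0 :: rt'), 1 :: (dl ++ cap :: rl'), n, tot) a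
        = (0 :: 1 :: ((dt ++ [q]) ++ rt'),
           1 :: ((dl ++ [1 + dt.sum]) ++ rl'),
           n - take, tot + inc * take) := by
      simp only [bodyA, gL, gP]
      rw [← htake, hPegs, hSval, hLeft]
      simp [List.append_assoc]
    -- peel one element off the range and apply the induction hypothesis
    rw [PySem.List.pyRange_one_cons (show a < r - 1 by omega)]
    simp only [List.foldl_cons]
    rw [hA]
    have := ih (a + 1) (by omega) (by omega) (dt ++ [q]) (dl ++ [1 + dt.sum]) rt' rl'
      (n - take) (tot + inc * take)
      (by simp; omega) (by simp; omega) (by simpa using hrt) (by simpa using hrl)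
    rw [this]
    -- unfold one step of roundB on the other side
    have hs : 1 + (dt ++ [q]).sum = (1 + dt.sum) + q := by simp; ring
    have hB : roundB inc ((cap :: rl').zip (p0 :: rt')) n tot (1 + dt.sum)
        = (q :: (roundB inc (rl'.zip rt') (n - take) (tot + inc * take) ((1 + dt.sum) + q)).1,
           (1 + dt.sum) :: (roundB inc (rl'.zip rt') (n - take) (tot + inc * take) ((1 + dt.sum) + q)).2.1,
           (roundB inc (rl'.zip rt') (n - take) (tot + inc * take) ((1 + dt.sum) + q)).2.2.1,
           (roundB inc (rl'.zip rt') (n - take) (tot + inc * take) ((1 + dt.sum) + q)).2.2.2) := by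
      simp only [List.zip_cons_cons, roundB]
      rfl
    rw [hs, hB]
    simp [List.append_assoc]

lemma loopEq : ∀ (fuel : Nat) (r inc : Int) (tail left : List Int) (n tot : Int),
    tail.length = (r - 2).toNat → left.length = (r - 2).toNat →
    loopA fuel r inc (0 :: 1 :: tail) (1 :: left) n tot = loopB fuel r inc tail left n tot := by
  intro fuel
  induction fuel with
  | zero => intros; rfl
  | succ f ih =>
    intro r inc tail left n tot htl hll
    simp only [loopA, loopB]
    by_cases hn : n > 0
    · simp only [if_pos hn]
      have hz : (left.zip tail).length = (r - 2).toNat := by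
        rw [List.length_zip, htl, hll, Nat.min_self]
      have hr := roundEq r inc (r - 2).toNat 1 le_rfl (by omega) [] [] tail left n tot
        (by simp) (by simp) htl hll
      simp only [List.nil_append, List.sum_nil, add_zero] at hr
      rw [hr]
      obtain ⟨l1, l2⟩ := roundB_len inc (left.zip tail) n tot 1
      exact ih r (inc * 2) _ _ _ _ (by rw [l1, hz]) (by rw [l2, hz])
    · simp only [if_neg hn]

lemma pegs_init (r : Int) (hr : 2 ≤ r) :
    PySem.List.pySetD (List.replicate r.toNat 0) 1 1
      = 0 :: 1 :: List.replicate (r - 2).toNat (0 : Int) := by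
  have hk : r.toNat = (r - 2).toNat + 2 := by omega
  rw [pySetD_nn _ _ _ (by norm_num), hk]
  rw [List.replicate_succ, List.replicate_succ]
  rfl

-- ===== VERDICT (by name: the statement is the Claim_ definition above) =====
theorem stepsNeeded_spec : Claim_equal_stepsNeeded := by
  intro r n _ hpre
  unfold Spec_stepsNeeded stepsNeeded stepsNeeded_alt
  by_cases h0 : n = 0
  · simp [h0]
  · simp only [if_neg h0]
    have hr2 : 2 ≤ r := by
      rcases hpre with h | h | ⟨h, _⟩
      · exact absurd h h0
      · omega
      · omega
    by_cases h1 : n = 1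
    · rw [if_pos h1, if_pos (by omega : n - 1 = 0), pegs_init r hr2]
    · rw [if_neg h1, if_neg (show ¬ (n - 1 = 0) by omega)]
      rw [pegs_init r hr2]
      rw [show (r - 1).toNat = (r - 2).toNat + 1 by omega, List.replicate_succ]
      exact loopEq _ r 1 _ _ (n - 1) 0 (by simp) (by simp)
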